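-- pv_equiv track=rewrite | github.com/qaz101044/CodingTest | 백준/Gold/2230. 수 고르기/수 고르기.py | solution
-- ===== SOURCE A (Python) =====
-- def solution(A, N, M) :
--     left, right = 0,0
--     answer = 2000000001
--
--     while right < N :
--         diff = A[right] - A[left]
--
--         if diff < M :
--             right += 1
--         elif diff > M :
--             answer = min(diff,answer)
--             left += 1
--         else :
--             return M
--     return answer
-- ===== SOURCE B (Python) =====
-- def solution(A, N, M):
--     answer = 2000000001
--     for i in range(N):
--         j = _bisect_left(A, A[i] + M, i, N)
--         if j < N:
--             answer = min(answer, A[j] - A[i])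
--     return answer
--
--
-- def _bisect_left(a, x, lo, hi):
--     # standard bisect.bisect_left algorithm with lo/hi bounds, written out because A imports nothing
--     while lo < hi:
--         mid = (lo + hi) // 2
--         if a[mid] < x:
--             lo = mid + 1
--         else:
--             hi = mid
--     return lo
-- ===== Notes on version B (the rewrite author's own statement) =====
-- stated objective: idiomatic
-- what changed: Replaces the sliding-window two-pointer with a per-index binary search: for each i, bisect_left over A[i:N] (hand-written, A imports nothing) finds the first element >= A[i]+M and the running minimum difference is kept.
-- outside the precondition, e.g. on solution([4, 1, 4, 3], 4, 1): A returns 2000000001, B returns 3; on solution([0, 2100000000], 2, 2100000000): A returns 2100000000, B returns 2000000001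
import Mathlib
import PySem

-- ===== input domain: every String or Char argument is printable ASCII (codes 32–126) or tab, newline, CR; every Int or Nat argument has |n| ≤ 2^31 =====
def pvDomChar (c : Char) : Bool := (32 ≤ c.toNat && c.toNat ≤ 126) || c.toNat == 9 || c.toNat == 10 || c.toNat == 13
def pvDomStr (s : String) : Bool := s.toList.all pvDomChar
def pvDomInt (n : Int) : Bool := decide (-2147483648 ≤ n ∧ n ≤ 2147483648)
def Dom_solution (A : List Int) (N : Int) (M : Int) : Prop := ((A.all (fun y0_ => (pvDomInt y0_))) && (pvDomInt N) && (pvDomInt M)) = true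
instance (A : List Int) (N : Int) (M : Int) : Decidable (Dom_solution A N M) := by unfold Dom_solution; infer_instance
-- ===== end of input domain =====

-- B replaces A's sliding-window two-pointer by a per-index binary search (bisect the sorted
-- suffix A[i:N] for the first element ≥ A[i]+M); objective: idiomatic, not faster.

-- ===== PORT A =====
-- while loop ported with a fuel counter (2*N.toNat+2 bounds the iterations: each step
-- increments left or right, both staying below N inside Pre_); IndexError (pyGet? = none)
-- ends the loop with the current answer as a totality guard — Pre_ excludes those inputs.
def loopA (A : List Int) (N M : Int) : Nat → Int → Int → Int → Int
  | 0, _, _, answer => answer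
  | fuel+1, left, right, answer =>
    if right < N then
      match PySem.List.pyGet? A right, PySem.List.pyGet? A left with
      | some ar, some al =>
        let diff := ar - al
        if diff < M then loopA A N M fuel left (right + 1) answer
        else if diff > M then loopA A N M fuel (left + 1) right (min diff answer)
        else M
      | _, _ => answer
    else answer

def solution (A : List Int) (N : Int) (M : Int) : Int :=
  loopA A N M (2 * N.toNat + 2) 0 0 2000000001

-- ===== PORT B =====
-- body of B's for-loop; Source B's hand-written _bisect_left(a, x, lo, hi) is exactly the standard
-- bisect_left loop with lo/hi bounds, ported as PySem.List.bisectLeftLoop (the identical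
-- algorithm; the fuel argument A.length bounds its iterations and is a totality guard)
def bisectStep (A : List Int) (N M : Int) (answer : Int) (i : Int) : Int :=
  match PySem.List.pyGet? A i with
  | some ai =>
    let j : Int := ((PySem.List.bisectLeftLoop A (ai + M) A.length i.toNat N.toNat : Nat) : Int)
    if j < N then
      match PySem.List.pyGet? A j with
      | some aj => min answer (aj - ai)
      | none => answer
    else answer
  | none => answer

def solution_alt (A : List Int) (N : Int) (M : Int) : Int :=
  (PySem.List.pyRange 0 N 1).foldl (bisectStep A N M) 2000000001

-- ===== PRECONDITION & SPEC =====
-- Pre_ is the problem's natural domain (Baekjoon 2230: A sorted ascending, N = len(A), 0 ≤ M ≤ 2·10⁹).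
-- It excludes: N > len(A) and M < 0, where A raises IndexError; unsorted first-N prefixes, where A's
-- two-pointer scan returns a value that depends on its accidental traversal; and M > 2000000000, where
-- A's early `return M` can exceed the 2000000001 sentinel. It is wider than N = len(A): any N ≤ len(A)
-- with sorted prefix is admitted (both programs only read A[0:N]).
def Pre_solution (A : List Int) (N : Int) (M : Int) : Prop :=
  N ≤ (A.length : Int) ∧ (A.take N.toNat).Pairwise (· ≤ ·) ∧ 0 ≤ M ∧ M ≤ 2000000000
instance (A : List Int) (N : Int) (M : Int) : Decidable (Pre_solution A N M) := by
  unfold Pre_solution; infer_instance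

def pvWitness_solution : List Int × Int × Int := ([1, 3, 8], 3, 2)

def Spec_solution (A : List Int) (N : Int) (M : Int) (out : Int) : Prop := out = solution_alt A N M
instance (A : List Int) (N : Int) (M : Int) (out : Int) : Decidable (Spec_solution A N M out) := by
  unfold Spec_solution; infer_instance

-- ===== CLAIM (what is proved, stated in full; the proofs are below) =====
def Claim_equal_solution : Prop := ∀ (A : List Int) (N : Int) (M : Int), Dom_solution A N M → Pre_solution A N M → Spec_solution A N M (solution A N M)

-- ===== LEMMAS AND PROOFS =====

-- A[k] read as a total function (indices used are always in range inside Pre_)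
def GetI (A : List Int) (k : Nat) : Int := A.getD k 0

-- d is the difference of a valid pair: indices i ≤ j inside the scanned prefix with difference ≥ M
def Valid (A : List Int) (N M d : Int) : Prop :=
  ∃ i j : Nat, i ≤ j ∧ (j : Int) < N ∧ M ≤ d ∧ d = GetI A j - GetI A i

-- the common characterisation both programs satisfy: the minimum of the sentinel and all valid differences
def MinChar (A : List Int) (N M r : Int) : Prop :=
  r ≤ 2000000001 ∧ (r = 2000000001 ∨ Valid A N M r) ∧ ∀ d, Valid A N M d → r ≤ d

theorem charP_unique {A : List Int} {N M r₁ r₂ : Int}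
    (h₁ : MinChar A N M r₁) (h₂ : MinChar A N M r₂) : r₁ = r₂ := by
  obtain ⟨hle₁, hv₁, hmin₁⟩ := h₁
  obtain ⟨hle₂, hv₂, hmin₂⟩ := h₂
  apply le_antisymm
  · rcases hv₂ with h | h
    · omega
    · exact hmin₁ _ h
  · rcases hv₁ with h | h
    · omega
    · exact hmin₂ _ h

theorem sorted_getI {A : List Int} {N : Int} (hN : N ≤ (A.length : Int))
    (hs : (A.take N.toNat).Pairwise (· ≤ ·)) {i j : Nat}
    (hij : i ≤ j) (hj : (j : Int) < N) : GetI A i ≤ GetI A j := by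
  rcases Nat.lt_or_ge i j with hlt | hge
  · have hjn : j < N.toNat := by omega
    have hjl : j < A.length := by omega
    have hil : i < A.length := by omega
    have hlen : (A.take N.toNat).length = N.toNat := by
      simp [List.length_take]; omega
    have := (List.pairwise_iff_getElem.mp hs) i j (by omega) (by omega) hlt
    rw [List.getElem_take, List.getElem_take] at this
    unfold GetI
    rw [List.getD_eq_getElem _ _ hil, List.getD_eq_getElem _ _ hjl]
    exact this
  · have : i = j := by omega
    simp [this]

theorem loopA_charP (A : List Int) (N M : Int) (hN : N ≤ (A.length : Int))
    (hs : (A.take N.toNat).Pairwise (· ≤ ·)) (hM0 : 0 ≤ M) (hM1 : M ≤ 2000000000) :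
    ∀ (fuel : Nat) (l r : Nat) (ans : Int), l ≤ r → (r : Int) ≤ N →
      (N.toNat - l) + (N.toNat - r) < fuel →
      ans ≤ 2000000001 → (ans = 2000000001 ∨ Valid A N M ans) →
      (∀ d, Valid A N M d →
        (∃ i j : Nat, l ≤ i ∧ i ≤ j ∧ r ≤ j ∧ (j : Int) < N ∧ M ≤ d ∧ d = GetI A j - GetI A i) ∨ ans ≤ d) →
      MinChar A N M (loopA A N M fuel (l : Int) (r : Int) ans) := by
  intro fuel
  induction fuel with
  | zero => intro l r ans _ _ hfuel _ _ _; omega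
  | succ fuel ih =>
    intro l r ans hlr hrN hfuel hansS hansV hcover
    by_cases hcond : (r : Int) < N
    · have hrlen : r < A.length := by omega
      have hllen : l < A.length := by omega
      have hget_r : PySem.List.pyGet? A (r : Int) = some (GetI A r) := by
        rw [PySem.List.pyGet?_natCast, List.getElem?_eq_getElem hrlen]
        unfold GetI; rw [List.getD_eq_getElem _ _ hrlen]
      have hget_l : PySem.List.pyGet? A (l : Int) = some (GetI A l) := by
        rw [PySem.List.pyGet?_natCast, List.getElem?_eq_getElem hllen]
        unfold GetI; rw [List.getD_eq_getElem _ _ hllen]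
      rw [loopA.eq_def]
      simp only [if_pos hcond, hget_r, hget_l]
      set diff := GetI A r - GetI A l with hdiff
      by_cases h1 : diff < M
      · rw [if_pos h1]
        have : ((r : Int) + 1) = ((r + 1 : Nat) : Int) := by push_cast; ring
        rw [this]
        apply ih l (r + 1) ans (by omega) (by omega) (by omega) hansS hansV
        intro d hd
        rcases hcover d hd with ⟨i, j, hli, hij, hrj, hjN, hMd, hdval⟩ | hle
        · rcases Nat.eq_or_lt_of_le hrj with hjr | hjr
          · exfalso
            have hiN : (i : Int) < N := by omega
            have : GetI A l ≤ GetI A i := sorted_getI hN hs hli hiN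
            have : d ≤ diff := by rw [hdval, ← hjr, hdiff]; omega
            omega
          · exact Or.inl ⟨i, j, hli, hij, by omega, hjN, hMd, hdval⟩
        · exact Or.inr hle
      · rw [if_neg h1]
        by_cases h2 : diff > M
        · rw [if_pos h2]
          have hlr' : l < r := by
            rcases Nat.eq_or_lt_of_le hlr with h | h
            · exfalso; rw [h] at hdiff; simp [hdiff] at h1 h2; omega
            · exact h
          have : ((l : Int) + 1) = ((l + 1 : Nat) : Int) := by push_cast; ring
          rw [this]
          apply ih (l + 1) r (min diff ans) (by omega) hrN (by omega)
            (le_trans (min_le_right _ _) hansS)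
          · rcases min_choice diff ans with h | h
            · rw [h]
              exact Or.inr ⟨l, r, hlr, hcond, by omega, hdiff⟩
            · rw [h]; exact hansV
          · intro d hd
            rcases hcover d hd with ⟨i, j, hli, hij, hrj, hjN, hMd, hdval⟩ | hle
            · rcases Nat.eq_or_lt_of_le hli with hil | hil
              · right
                have : GetI A r ≤ GetI A j := sorted_getI hN hs hrj hjN
                have : diff ≤ d := by rw [hdval, ← hil, hdiff]; omega
                exact le_trans (min_le_left _ _) this
              · exact Or.inl ⟨i, j, by omega, hij, hrj, hjN, hMd, hdval⟩
            · exact Or.inr (le_trans (min_le_right _ _) hle)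
        · rw [if_neg h2]
          have hdM : diff = M := by omega
          refine ⟨by omega, Or.inr ⟨l, r, hlr, hcond, by omega, by omega⟩, ?_⟩
          intro d hd
          obtain ⟨_, _, _, _, hMd, _⟩ := hd
          exact hMd
    · rw [loopA.eq_def]
      simp only [if_neg hcond]
      refine ⟨hansS, hansV, ?_⟩
      intro d hd
      rcases hcover d hd with ⟨i, j, _, _, hrj, hjN, _, _⟩ | hle
      · exfalso; omega
      · exact hle

theorem solution_charP (A : List Int) (N M : Int) (hpre : Pre_solution A N M) :
    MinChar A N M (solution A N M) := by
  obtain ⟨hN, hs, hM0, hM1⟩ := hpre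
  unfold solution
  by_cases hNpos : 0 ≤ N
  · have h0 : ((0 : Nat) : Int) = (0 : Int) := by norm_num
    rw [← h0]
    apply loopA_charP A N M hN hs hM0 hM1 (2 * N.toNat + 2) 0 0 2000000001
      (le_refl 0) (by omega) (by omega) (le_refl _) (Or.inl rfl)
    intro d hd
    obtain ⟨i, j, hij, hjN, hMd, hdval⟩ := hd
    exact Or.inl ⟨i, j, Nat.zero_le _, hij, Nat.zero_le _, hjN, hMd, hdval⟩
  · have hN0 : N.toNat = 0 := by omega
    rw [hN0]
    have hcond : ¬ ((0 : Int) < N) := by omega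
    rw [show 2 * 0 + 2 = 1 + 1 from rfl, loopA, if_neg hcond]
    refine ⟨le_refl _, Or.inl rfl, ?_⟩
    intro d hd
    obtain ⟨i, j, _, hjN, _, _⟩ := hd
    exfalso; omega

-- B-side: valid pairs whose left index was already processed by the for loop
def ValidLow (A : List Int) (N M : Int) (k : Nat) (d : Int) : Prop :=
  ∃ i j : Nat, i < k ∧ i ≤ j ∧ (j : Int) < N ∧ M ≤ d ∧ d = GetI A j - GetI A i

-- windowed spec of Source B's hand-written binary search (ported as bisectLeftLoop): on the
-- sorted prefix A[0:N] it returns the first index in [lo, hi) holding a value ≥ x (hi if none);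
-- the library lemma bisectLeftLoop_spec assumes facts about A[0:lo] that do not hold here
theorem bisectLoop_window (A : List Int) (x : Int) (N : Int) (hN : N ≤ (A.length : Int))
    (hs : (A.take N.toNat).Pairwise (· ≤ ·)) :
    ∀ (fuel lo hi : Nat), lo ≤ hi → hi ≤ N.toNat → hi - lo ≤ fuel →
      lo ≤ PySem.List.bisectLeftLoop A x fuel lo hi ∧
      PySem.List.bisectLeftLoop A x fuel lo hi ≤ hi ∧
      (∀ k, lo ≤ k → k < PySem.List.bisectLeftLoop A x fuel lo hi → GetI A k < x) ∧
      (PySem.List.bisectLeftLoop A x fuel lo hi < hi → x ≤ GetI A (PySem.List.bisectLeftLoop A x fuel lo hi)) := by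
  intro fuel
  induction fuel with
  | zero =>
    intro lo hi hlh hhN hfuel
    have : lo = hi := by omega
    rw [PySem.List.bisectLeftLoop.eq_def]
    simp only
    subst this
    exact ⟨le_refl _, le_refl _, fun k hk1 hk2 => by omega, fun h => by omega⟩
  | succ fuel ih =>
    intro lo hi hlh hhN hfuel
    rw [PySem.List.bisectLeftLoop.eq_def]
    simp only
    by_cases hcond : lo < hi
    · rw [if_pos hcond]
      have hmid1 : lo ≤ (lo + hi) / 2 := by omega
      have hmid2 : (lo + hi) / 2 < hi := by omega
      have hmlen : (lo + hi) / 2 < A.length := by omega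
      have hmget : GetI A ((lo + hi) / 2) = A[(lo + hi) / 2] := by
        unfold GetI; rw [List.getD_eq_getElem _ _ hmlen]
      rw [List.getElem?_eq_getElem hmlen]
      simp only
      by_cases hlt : A[(lo + hi) / 2] < x
      · rw [if_pos hlt]
        obtain ⟨h1, h2, h3, h4⟩ := ih ((lo + hi) / 2 + 1) hi (by omega) hhN (by omega)
        refine ⟨by omega, h2, ?_, h4⟩
        intro k hk1 hk2
        rcases Nat.lt_or_ge k ((lo + hi) / 2 + 1) with hkm | hkm
        · have : GetI A k ≤ GetI A ((lo + hi) / 2) :=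
            sorted_getI hN hs (by omega) (by push_cast; omega)
          omega
        · exact h3 k hkm hk2
      · rw [if_neg hlt]
        obtain ⟨h1, h2, h3, h4⟩ := ih lo ((lo + hi) / 2) (by omega) (by omega) (by omega)
        refine ⟨h1, by omega, h3, ?_⟩
        intro _
        rcases Nat.lt_or_ge (PySem.List.bisectLeftLoop A x fuel lo ((lo + hi) / 2)) ((lo + hi) / 2) with hr | hr
        · exact h4 hr
        · have : PySem.List.bisectLeftLoop A x fuel lo ((lo + hi) / 2) = (lo + hi) / 2 := by omega
          rw [this, hmget]
          omega
    · rw [if_neg hcond]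
      exact ⟨le_refl _, by omega, fun k hk1 hk2 => by omega, fun h => by omega⟩

theorem foldB_inv (A : List Int) (N M : Int) (hN : N ≤ (A.length : Int))
    (hs : (A.take N.toNat).Pairwise (· ≤ ·)) :
    ∀ (n : Nat), (n : Int) ≤ N →
      (let res := (PySem.List.pyRange 0 (n : Int) 1).foldl (bisectStep A N M) 2000000001
       res ≤ 2000000001 ∧ (res = 2000000001 ∨ Valid A N M res) ∧
         ∀ d, ValidLow A N M n d → res ≤ d) := by
  intro n
  induction n with
  | zero =>
    intro _
    rw [show ((0 : Nat) : Int) = (0 : Int) from rfl,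
      PySem.List.pyRange_one_eq_nil (le_refl (0 : Int))]
    simp only [List.foldl_nil]
    refine ⟨le_refl _, Or.inl trivial, ?_⟩
    intro d hd
    obtain ⟨i, j, hik, _, _, _, _⟩ := hd
    omega
  | succ n ih =>
    intro hn1
    have hnN : (n : Int) < N := by push_cast at hn1 ⊢; omega
    obtain ⟨ihS, ihV, ihLow⟩ := ih (by omega)
    have hcast : ((n + 1 : Nat) : Int) = (n : Int) + 1 := by push_cast; ring
    simp only [hcast, PySem.List.pyRange_one_succ_right (by omega : (0:Int) ≤ (n:Int)),
      List.foldl_append, List.foldl_cons, List.foldl_nil]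
    set res := (PySem.List.pyRange 0 (n : Int) 1).foldl (bisectStep A N M) 2000000001 with hres
    have hnlen : n < A.length := by omega
    have hget_n : PySem.List.pyGet? A (n : Int) = some (GetI A n) := by
      rw [PySem.List.pyGet?_natCast, List.getElem?_eq_getElem hnlen]
      unfold GetI; rw [List.getD_eq_getElem _ _ hnlen]
    set x := GetI A n + M with hx
    obtain ⟨hbl, hbu, hlo, hhi⟩ := bisectLoop_window A x N hN hs A.length n N.toNat
      (by omega) (le_refl _) (by omega)
    set b := PySem.List.bisectLeftLoop A x A.length n N.toNat with hb
    unfold bisectStep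
    rw [hget_n]
    simp only [Int.toNat_natCast, ← hx, ← hb]
    by_cases hj : ((b : Nat) : Int) < N
    · rw [if_pos hj]
      have hbN : b < N.toNat := by omega
      have hblen : b < A.length := by omega
      have hget_b : PySem.List.pyGet? A ((b : Nat) : Int) = some (GetI A b) := by
        rw [PySem.List.pyGet?_natCast, List.getElem?_eq_getElem hblen]
        unfold GetI; rw [List.getD_eq_getElem _ _ hblen]
      rw [hget_b]
      simp only
      have hxb : x ≤ GetI A b := hhi hbN
      have hcandV : Valid A N M (GetI A b - GetI A n) :=
        ⟨n, b, hbl, by omega, by omega, rfl⟩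
      refine ⟨le_trans (min_le_left _ _) ihS, ?_, ?_⟩
      · rcases min_choice res (GetI A b - GetI A n) with h | h
        · rw [h]; exact ihV
        · rw [h]; exact Or.inr hcandV
      · intro d hd
        obtain ⟨i, j, hik, hij, hjN, hMd, hdval⟩ := hd
        rcases Nat.lt_or_ge i n with hin | hin
        · exact le_trans (min_le_left _ _) (ihLow d ⟨i, j, hin, hij, hjN, hMd, hdval⟩)
        · have hieq : i = n := by omega
          subst hieq
          -- j cannot be below the bisect position
          have hjge : b ≤ j := by
            by_contra hcon
            push Not at hcon
            have := hlo j hij hcon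
            omega
          have : GetI A b ≤ GetI A j := sorted_getI hN hs hjge hjN
          have : GetI A b - GetI A i ≤ d := by omega
          exact le_trans (min_le_right _ _) this
    · rw [if_neg hj]
      have hbfull : b = N.toNat := by omega
      refine ⟨ihS, ihV, ?_⟩
      intro d hd
      obtain ⟨i, j, hik, hij, hjN, hMd, hdval⟩ := hd
      rcases Nat.lt_or_ge i n with hin | hin
      · exact ihLow d ⟨i, j, hin, hij, hjN, hMd, hdval⟩
      · exfalso
        have hieq : i = n := by omega
        subst hieq
        have := hlo j hij (by omega)
        omega

theorem solution_alt_charP (A : List Int) (N M : Int) (hpre : Pre_solution A N M) :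
    MinChar A N M (solution_alt A N M) := by
  obtain ⟨hN, hs, hM0, hM1⟩ := hpre
  unfold solution_alt
  by_cases hNpos : 0 ≤ N
  · have hNeq : ((N.toNat : Nat) : Int) = N := Int.toNat_of_nonneg hNpos
    obtain ⟨hS, hV, hLow⟩ := foldB_inv A N M hN hs N.toNat (by omega)
    rw [hNeq] at hS hV hLow
    refine ⟨hS, hV, ?_⟩
    intro d hd
    obtain ⟨i, j, hij, hjN, hMd, hdval⟩ := hd
    exact hLow d ⟨i, j, by omega, hij, hjN, hMd, hdval⟩
  · rw [PySem.List.pyRange_one_eq_nil (by omega : N ≤ (0 : Int)), List.foldl_nil]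
    refine ⟨le_refl _, Or.inl rfl, ?_⟩
    intro d hd
    obtain ⟨i, j, _, hjN, _, _⟩ := hd
    exfalso; omega

-- ===== VERDICT (by name: the statement is the Claim_ definition above) =====
theorem solution_spec : Claim_equal_solution := by
  intro A N M _ hpre
  unfold Spec_solution
  exact charP_unique (solution_charP A N M hpre) (solution_alt_charP A N M hpre)
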